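-- pv_equiv track=rewrite | github.com/ycm0926/Algorithm | 프로그래머스/2/132265. 롤케이크 자르기/롤케이크 자르기.py | solution
-- ===== SOURCE A (Python) =====
-- def solution(topping):
--     answer = 0
--     a, b = dict(), dict()
--
--     for i in topping:
--         if i not in b:
--             b[i] = 1
--         else:
--             b[i] += 1
--
--     for i in range(len(topping)):
--         b[topping[i]] -= 1
--         if b[topping[i]] == 0:
--             del b[topping[i]]
--
--         if topping[i] not in a:
--             a[topping[i]] = 1
--         else:
--             a[topping[i]] += 1
--
--         if len(a) == len(b):
--             answer += 1
--
--     return answer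
-- ===== SOURCE B (Python) =====
-- def solution(topping):
--     # suffix[i] = number of distinct toppings in topping[i:]
--     suffix = [0]
--     seen = set()
--     for x in reversed(topping):
--         seen.add(x)
--         suffix.append(len(seen))
--     suffix.reverse()
--
--     answer = 0
--     left = set()
--     for x, c in zip(topping, suffix[1:]):
--         left.add(x)
--         if len(left) == c:
--             answer += 1
--     return answer
-- ===== Notes on version B (the rewrite author's own statement) =====
-- stated objective: faster
-- what changed: Replaces A's live decrement-and-delete Counter reconstruction of the right half by a precomputed suffix-distinct table built in one right-to-left set pass, consulted during a single forward pass that only grows a left set.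
import Mathlib
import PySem

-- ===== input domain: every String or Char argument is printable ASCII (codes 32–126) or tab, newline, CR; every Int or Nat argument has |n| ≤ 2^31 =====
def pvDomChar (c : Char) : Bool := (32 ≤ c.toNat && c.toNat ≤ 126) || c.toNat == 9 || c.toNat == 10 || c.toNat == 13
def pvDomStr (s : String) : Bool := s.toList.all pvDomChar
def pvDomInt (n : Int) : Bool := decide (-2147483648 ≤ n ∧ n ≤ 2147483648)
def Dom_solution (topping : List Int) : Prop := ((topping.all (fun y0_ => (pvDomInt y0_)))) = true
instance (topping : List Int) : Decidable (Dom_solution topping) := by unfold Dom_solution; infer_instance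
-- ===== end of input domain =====

-- B replaces A's live decrement/delete Counter of the right half by a precomputed
-- suffix-distinct table plus one forward pass with a growing left set (same O(n) dict/set
-- work, measurably faster by a constant factor in a timing run).

-- ===== PORT A =====
-- the body of A's second for-loop over range(len(topping)), on the fetched element t
def stepAEl (st : Int × PySem.Dict Int Int × PySem.Dict Int Int) (t : Int) :
    Int × PySem.Dict Int Int × PySem.Dict Int Int :=
  let b := st.2.2.insert t (st.2.2.getD t 0 - 1)
  let b := if b.getD t 0 = 0 then b.erase t else b
  let a := if !(st.2.1.contains t) then st.2.1.insert t 1 else st.2.1.insert t (st.2.1.getD t 0 + 1)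
  (if a.size = b.size then st.1 + 1 else st.1, a, b)

def solution (topping : List Int) : Int :=
  let answer : Int := 0
  let b := topping.foldl
    (fun (b : PySem.Dict Int Int) i =>
      if !(b.contains i) then b.insert i 1 else b.insert i (b.getD i 0 + 1))
    PySem.Dict.empty
  let st := (PySem.List.pyRange 0 (PySem.List.len topping)).foldl
    (fun st i => stepAEl st (PySem.List.pyGetD topping i 0))
    (answer, PySem.Dict.empty, b)
  st.1

-- ===== PORT B =====
-- right-to-left pass: final set of seen toppings, and the list whose i-th entry is
-- the number of distinct toppings in topping[i:] (last entry 0)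
def suffixDistinct : List Int → PySem.Set Int × List Int
  | [] => (PySem.Set.empty, [(0 : Int)])
  | x :: xs =>
    let p := suffixDistinct xs
    let s := PySem.Set.add p.1 x
    (s, PySem.Set.len s :: p.2)

-- forward pass: walk topping in lockstep with suffix[1:], growing the left set
def countPass : List Int → List Int → PySem.Set Int → Int → Int
  | [], _, _, ans => ans
  | _ :: _, [], _, ans => ans
  | x :: xs, c :: cs, left, ans =>
    let l := PySem.Set.add left x
    countPass xs cs l (if PySem.Set.len l = c then ans + 1 else ans)

def solution_alt (topping : List Int) : Int :=
  countPass topping (suffixDistinct topping).2.tail PySem.Set.empty 0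

-- ===== PRECONDITION & SPEC =====
def Spec_solution (topping : List Int) (out : Int) : Prop := out = solution_alt topping
instance (topping : List Int) (out : Int) : Decidable (Spec_solution topping out) := by unfold Spec_solution; infer_instance

-- ===== CLAIM (what is proved, stated in full; the proofs are below) =====
def Claim_equal_solution : Prop := ∀ (topping : List Int), Dom_solution topping → Spec_solution topping (solution topping)

-- ===== LEMMAS AND PROOFS =====

-- reference count: walking suf with accumulated prefix pre, count positions where the
-- number of distinct elements of the prefix-so-far equals that of the rest
def refCount : List Int → List Int → Int
  | _, [] => 0
  | pre, x :: rest =>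
    (if (pre ++ [x]).toFinset.card = rest.toFinset.card then 1 else 0) + refCount (pre ++ [x]) rest

lemma len_of_nodup_mem (s l : List Int) (hn : s.Nodup) (hm : ∀ y, y ∈ s ↔ y ∈ l) :
    s.length = l.toFinset.card := by
  have h : s.toFinset = l.toFinset := by
    ext y; simp only [List.mem_toFinset]; exact hm y
  rw [← h, List.toFinset_card_of_nodup hn]

lemma size_eq_keys_length (d : PySem.Dict Int Int) : d.size = d.keys.length := by
  simp [PySem.Dict.size, PySem.Dict.keys]

-- facts about Dict.erase (not in the PySem lemma book)
lemma keys_erase (d : PySem.Dict Int Int) (x : Int) :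
    (d.erase x).keys = d.keys.filter (fun k => !(k == x)) := by
  simp only [PySem.Dict.erase, PySem.Dict.keys, List.filter_map]
  rfl

lemma contains_erase (d : PySem.Dict Int Int) (x k : Int) :
    (d.erase x).contains k = true ↔ (d.contains k = true ∧ k ≠ x) := by
  simp [PySem.Dict.erase, PySem.Dict.contains, List.any_eq_true]

lemma find?_filter_key_self (l : List (Int × Int)) (x : Int) :
    (l.filter fun p => !(p.1 == x)).find? (fun p => p.1 == x) = none := by
  induction l with
  | nil => simp
  | cons p t ih => by_cases h : p.1 = x <;> simp_all

lemma find?_filter_key_ne (l : List (Int × Int)) (x k : Int) (h : k ≠ x) :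
    (l.filter fun p => !(p.1 == x)).find? (fun p => p.1 == k) = l.find? (fun p => p.1 == k) := by
  induction l with
  | nil => simp
  | cons p t ih =>
    have hxk : (x == k) = false := by simp; omega
    by_cases h1 : p.1 = x
    · simp [h1, hxk, ih]
    · by_cases h2 : p.1 = k <;> simp [h1, h2, h, ih]

lemma getD_erase_self (d : PySem.Dict Int Int) (x : Int) :
    (d.erase x).getD x 0 = 0 := by
  rw [PySem.Dict.getD_eq_get?_getD]
  simp only [PySem.Dict.erase, PySem.Dict.get?]
  rw [find?_filter_key_self]
  rfl

lemma getD_erase_of_ne (d : PySem.Dict Int Int) (x k : Int) (h : k ≠ x) :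
    (d.erase x).getD k 0 = d.getD k 0 := by
  rw [PySem.Dict.getD_eq_get?_getD, PySem.Dict.getD_eq_get?_getD]
  simp only [PySem.Dict.erase, PySem.Dict.get?]
  rw [find?_filter_key_ne _ _ _ h]

-- the A-loop invariant
lemma loopA : ∀ (suf pre : List Int) (ans : Int) (a b : PySem.Dict Int Int),
    a.keys.Nodup → (∀ k, a.contains k = true ↔ k ∈ pre) →
    b.keys.Nodup → (∀ k, b.contains k = true ↔ k ∈ suf) →
    (∀ k, b.getD k 0 = (suf.count k : Int)) →
    (suf.foldl stepAEl (ans, a, b)).1 = ans + refCount pre suf := by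
  intro suf
  induction suf with
  | nil => intro pre ans a b _ _ _ _ _; simp [refCount]
  | cons x rest ih =>
    intro pre ans a b han ham hbn hbm hbc
    have hbcx : b.contains x = true := (hbm x).mpr (by simp)
    -- the updated b
    have hval : b.getD x 0 - 1 = (rest.count x : Int) := by
      rw [hbc x]; push_cast [List.count_cons_self]; ring
    set b0 := b.insert x (b.getD x 0 - 1) with hb0def
    have hb0keys : b0.keys = b.keys := PySem.Dict.keys_insert_of_contains b _ hbcx
    have hb0getx : b0.getD x 0 = (rest.count x : Int) := by
      rw [hb0def, PySem.Dict.getD_insert_self, hval]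
    have hb0get : ∀ k, k ≠ x → b0.getD k 0 = (rest.count k : Int) := by
      intro k hk
      rw [hb0def, PySem.Dict.getD_insert, if_neg hk, hbc k]
      norm_cast
      simp [Ne.symm hk]
    have hb0m : ∀ k, b0.contains k = true ↔ k ∈ x :: rest := by
      intro k
      rw [PySem.Dict.contains_iff_mem_keys, hb0keys, ← PySem.Dict.contains_iff_mem_keys]
      exact hbm k
    set b1 := if b0.getD x 0 = 0 then b0.erase x else b0 with hb1def
    have hb1n : b1.keys.Nodup := by
      rw [hb1def]
      split
      · rw [keys_erase, hb0keys]; exact hbn.filter _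
      · rw [hb0keys]; exact hbn
    have hb1m : ∀ k, b1.contains k = true ↔ k ∈ rest := by
      intro k
      rw [hb1def]
      split
      · rename_i h0
        rw [contains_erase, hb0m k]
        have hxr : x ∉ rest := by
          rw [hb0getx] at h0
          have : rest.count x = 0 := by exact_mod_cast h0
          exact List.count_eq_zero.mp this
        constructor
        · rintro ⟨hmem, hne⟩
          rcases List.mem_cons.mp hmem with h | h
          · exact absurd h hne
          · exact h
        · intro hk
          exact ⟨List.mem_cons_of_mem _ hk, fun he => hxr (he ▸ hk)⟩
      · rename_i h0
        rw [hb0m k]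
        have hxr : x ∈ rest := by
          rw [hb0getx] at h0
          have : rest.count x ≠ 0 := by exact_mod_cast h0
          exact List.count_pos_iff.mp (Nat.pos_of_ne_zero this)
        constructor
        · intro hmem
          rcases List.mem_cons.mp hmem with h | h
          · exact h ▸ hxr
          · exact h
        · exact List.mem_cons_of_mem _
    have hb1c : ∀ k, b1.getD k 0 = (rest.count k : Int) := by
      intro k
      rw [hb1def]
      split
      · rename_i h0
        by_cases hk : k = x
        · subst hk
          rw [getD_erase_self, hb0getx] at *
          omega
        · rw [getD_erase_of_ne _ _ _ hk]
          exact hb0get k hk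
      · by_cases hk : k = x
        · subst hk; exact hb0getx
        · exact hb0get k hk
    -- the updated a
    set a1 := if !(a.contains x) then a.insert x 1 else a.insert x (a.getD x 0 + 1) with ha1def
    have hkeys1 : (a1.keys = a.keys ∧ x ∈ pre) ∨ (a1.keys = a.keys ++ [x] ∧ x ∉ a.keys) := by
      cases hax : a.contains x with
      | true =>
        refine Or.inl ⟨?_, (ham x).mp hax⟩
        rw [ha1def, hax, if_neg (by simp)]
        exact PySem.Dict.keys_insert_of_contains a _ hax
      | false =>
        refine Or.inr ⟨?_, ?_⟩
        · rw [ha1def, hax, if_pos (by simp)]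
          exact PySem.Dict.keys_insert_of_not_contains a _ hax
        · intro h
          rw [← PySem.Dict.contains_iff_mem_keys] at h
          simp [hax] at h
    have ha1n : a1.keys.Nodup := by
      rcases hkeys1 with ⟨h1, _⟩ | ⟨h1, h2⟩
      · rw [h1]; exact han
      · rw [h1]
        simp only [List.nodup_append, List.nodup_cons, List.not_mem_nil, not_false_iff,
          List.nodup_nil, and_true, true_and]
        refine ⟨han, ?_⟩
        simpa using fun y hy he => h2 (by rw [← he]; exact hy)
    have ha1m : ∀ k, a1.contains k = true ↔ k ∈ pre ++ [x] := by
      intro k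
      rw [PySem.Dict.contains_iff_mem_keys]
      rcases hkeys1 with ⟨h1, hxpre⟩ | ⟨h1, _⟩
      · rw [h1, ← PySem.Dict.contains_iff_mem_keys, ham k]
        simp only [List.mem_append, List.mem_singleton]
        constructor
        · exact Or.inl
        · rintro (h | h)
          · exact h
          · exact h ▸ hxpre
      · rw [h1, List.mem_append, List.mem_append, ← PySem.Dict.contains_iff_mem_keys, ham k]
    -- sizes
    have hsa : a1.size = (pre ++ [x]).toFinset.card := by
      rw [size_eq_keys_length]
      refine len_of_nodup_mem _ _ ha1n fun y => ?_
      rw [← PySem.Dict.contains_iff_mem_keys]; exact ha1m y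
    have hsb : b1.size = rest.toFinset.card := by
      rw [size_eq_keys_length]
      refine len_of_nodup_mem _ _ hb1n fun y => ?_
      rw [← PySem.Dict.contains_iff_mem_keys]; exact hb1m y
    -- one step of the fold
    have hstep : stepAEl (ans, a, b) x
        = (if a1.size = b1.size then ans + 1 else ans, a1, b1) := by
      rw [stepAEl, ← hb0def, ← hb1def, ← ha1def]
    rw [List.foldl_cons, hstep, refCount]
    rw [ih (pre ++ [x]) _ a1 b1 ha1n ha1m hb1n hb1m hb1c]
    rw [hsa, hsb]
    by_cases hc : (pre ++ [x]).toFinset.card = rest.toFinset.card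
    · rw [if_pos hc, if_pos hc]; ring
    · rw [if_neg hc, if_neg hc]; ring

-- characterisation of suffixDistinct
lemma sd_fst (xs : List Int) :
    (suffixDistinct xs).1.Nodup ∧ ∀ y, y ∈ (suffixDistinct xs).1 ↔ y ∈ xs := by
  induction xs with
  | nil => simp [suffixDistinct, PySem.Set.empty]
  | cons x t ih =>
    refine ⟨PySem.Set.nodup_add _ x ih.1, fun y => ?_⟩
    rw [show (suffixDistinct (x :: t)).1 = PySem.Set.add (suffixDistinct t).1 x from rfl,
      PySem.Set.mem_add]
    simp [ih.2 y]
    tauto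

def dvals : List Int → List Int
  | [] => [(0 : Int)]
  | x :: xs => ((x :: xs).toFinset.card : Int) :: dvals xs

lemma dvals_head (l : List Int) : dvals l = (l.toFinset.card : Int) :: (dvals l).tail := by
  cases l <;> simp [dvals]

lemma sd_snd (xs : List Int) : (suffixDistinct xs).2 = dvals xs := by
  induction xs with
  | nil => rfl
  | cons x t ih =>
    have h := sd_fst (x :: t)
    have hlen : ((suffixDistinct (x :: t)).1.length : Int) = (((x :: t).toFinset.card : Nat) : Int) := by
      exact congrArg Nat.cast (len_of_nodup_mem _ _ h.1 h.2)
    show PySem.Set.len (suffixDistinct (x :: t)).1 :: (suffixDistinct t).2 = _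
    rw [dvals, ih]
    congr 1

-- the B-loop invariant
lemma loopB : ∀ (suf pre : List Int) (left : PySem.Set Int) (ans : Int),
    left.Nodup → (∀ y, y ∈ left ↔ y ∈ pre) →
    countPass suf (dvals suf).tail left ans = ans + refCount pre suf := by
  intro suf
  induction suf with
  | nil => intro pre left ans _ _; simp [countPass, refCount]
  | cons x rest ih =>
    intro pre left ans hn hm
    have : (dvals (x :: rest)).tail = dvals rest := rfl
    rw [this, dvals_head rest]
    show countPass (x :: rest) (_ :: _) left ans = _
    rw [countPass]
    have hn' : (PySem.Set.add left x).Nodup := PySem.Set.nodup_add _ x hn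
    have hm' : ∀ y, y ∈ PySem.Set.add left x ↔ y ∈ pre ++ [x] := by
      intro y; rw [PySem.Set.mem_add]; simp [hm y]
    have hlen : PySem.Set.len (PySem.Set.add left x) = ((pre ++ [x]).toFinset.card : Int) := by
      show ((PySem.Set.add left x).length : Int) = _
      exact congrArg Nat.cast (len_of_nodup_mem _ _ hn' hm')
    rw [ih (pre ++ [x]) _ _ hn' hm', refCount]
    by_cases hc : (pre ++ [x]).toFinset.card = rest.toFinset.card
    · rw [if_pos (by rw [hlen]; exact_mod_cast hc), if_pos hc]; ring
    · rw [if_neg (by rw [hlen]; exact_mod_cast hc), if_neg hc]; ring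

lemma solution_eq_ref (topping : List Int) : solution topping = refCount [] topping := by
  have hb : topping.foldl
      (fun (b : PySem.Dict Int Int) i =>
        if !(b.contains i) then b.insert i 1 else b.insert i (b.getD i 0 + 1))
      PySem.Dict.empty = PySem.Dict.counter topping := by
    rw [PySem.List.foldl_congr_mem _ _
      (fun (d : PySem.Dict Int Int) x => d.insert x (d.getD x 0 + 1)) _ ?_]
    · exact PySem.Dict.foldl_insert_getD_add_one_eq_counter topping
    · intro acc x _
      cases hc : acc.contains x with
      | true => simp
      | false => simp [PySem.Dict.getD_of_not_contains acc 0 hc]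
  show ((PySem.List.pyRange 0 (PySem.List.len topping)).foldl
      (fun st i => stepAEl st (PySem.List.pyGetD topping i 0))
      ((0 : Int), PySem.Dict.empty, topping.foldl
        (fun (b : PySem.Dict Int Int) i =>
          if !(b.contains i) then b.insert i 1 else b.insert i (b.getD i 0 + 1))
        PySem.Dict.empty)).1 = refCount [] topping
  rw [hb, PySem.List.foldl_pyRange_pyGetD topping 0 stepAEl _ (le_refl 0)]
  rw [show (0 : Int).toNat = 0 from rfl, List.drop_zero]
  rw [loopA topping [] 0 PySem.Dict.empty (PySem.Dict.counter topping)
    (by simp [PySem.Dict.keys, PySem.Dict.empty])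
    (by intro k; simp [PySem.Dict.contains, PySem.Dict.empty])
    (PySem.Dict.nodup_keys_counter topping)
    (by intro k; rw [PySem.Dict.contains_counter]; exact List.contains_iff_mem)
    (by intro k; exact PySem.Dict.getD_counter topping k)]
  exact zero_add _

lemma solution_alt_eq_ref (topping : List Int) : solution_alt topping = refCount [] topping := by
  show countPass topping (suffixDistinct topping).2.tail PySem.Set.empty 0 = refCount [] topping
  rw [sd_snd]
  rw [loopB topping [] PySem.Set.empty 0 (by simp [PySem.Set.empty])
    (by intro y; simp [PySem.Set.empty])]
  exact zero_add _

-- ===== VERDICT (by name: the statement is the Claim_ definition above) =====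
theorem solution_spec : Claim_equal_solution := by
  intro topping _
  unfold Spec_solution
  rw [solution_eq_ref, solution_alt_eq_ref]
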